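-- pv_equiv track=rewrite | github.com/MauererM/profit | profit_src/helper.py | create_dict_from_list
-- ===== SOURCE A (Python) =====
-- def create_dict_from_list(string_list):
--     """Creates and returns a dictionary from a list of strings, where the values are the list indices.
--     Note: If there are duplicate entries in the string_list, the previous entries will be overwritten by the latter ones
--     :param string_list: List of strings
--     :return: Dict with the strings as keys and values as list indices"""
--     if not isinstance(string_list, list):
--         raise RuntimeError("Expected a list")
--     if len(string_list) == 0:
--         return {}
--     if not isinstance(string_list[0], str):
--         raise RuntimeError("Expected a list of strings")
--     d = {}
--     for i, txt in enumerate(string_list):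
--         if txt not in d:
--             d[txt] = i
--         else:
--             raise RuntimeError("Received duplicate date when trying to create date-dict. This is likely not OK.")
--     return d
-- ===== SOURCE B (Python) =====
-- def create_dict_from_list(string_list):
--     """Same mapping as A, but duplicate detection is done up front by sorting a copy
--     and scanning adjacent pairs; the dict itself is then built in one shot with
--     dict(zip(...)), with no per-element membership test."""
--     if not isinstance(string_list, list):
--         raise RuntimeError("Expected a list")
--     if len(string_list) == 0:
--         return {}
--     if not isinstance(string_list[0], str):
--         raise RuntimeError("Expected a list of strings")
--     s = sorted(string_list)
--     for a, b in zip(s, s[1:]):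
--         if a == b:
--             raise RuntimeError("Received duplicate date when trying to create date-dict. This is likely not OK.")
--     return dict(zip(string_list, range(len(string_list))))
-- ===== Notes on version B (the rewrite author's own statement) =====
-- stated objective: alternative
-- what changed: Duplicate detection moves out of the building loop entirely: B sorts a copy and scans adjacent pairs for equality (sort-then-scan), then constructs the whole dict at once via dict(zip(string_list, range(len(string_list)))), whereas A interleaves a per-element membership test with incremental insertion.
import Mathlib
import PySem

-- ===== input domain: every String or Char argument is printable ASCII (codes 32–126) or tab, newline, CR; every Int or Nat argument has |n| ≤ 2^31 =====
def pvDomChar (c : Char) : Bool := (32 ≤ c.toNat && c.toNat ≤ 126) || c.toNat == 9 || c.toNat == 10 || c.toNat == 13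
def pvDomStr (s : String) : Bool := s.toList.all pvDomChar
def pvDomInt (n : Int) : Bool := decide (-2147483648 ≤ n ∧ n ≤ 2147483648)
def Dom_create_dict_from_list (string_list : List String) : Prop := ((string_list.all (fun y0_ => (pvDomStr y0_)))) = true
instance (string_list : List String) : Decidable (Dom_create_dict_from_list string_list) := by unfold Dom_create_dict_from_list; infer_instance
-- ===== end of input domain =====

-- B detects duplicates up front by sorting a copy and scanning adjacent pairs, then builds
-- the whole dict at once from zip(string_list, range(n)); A interleaves a per-element
-- membership test with incremental insertion. Same return values on duplicate-free lists.


-- ===== PORT A =====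
-- the 'for i, txt in enumerate(string_list)' loop; on a duplicate Python raises
-- RuntimeError — outside Pre_; the port stops and returns the dict built so far there
def createDictLoopA : List (Int × String) → PySem.Dict String Int → PySem.Dict String Int
  | [], d => d
  | (i, txt) :: rest, d =>
    if d.contains txt = false then createDictLoopA rest (d.insert txt i)
    else d  -- raise RuntimeError("Received duplicate date ...")

def create_dict_from_list (string_list : List String) : List (String × Int) :=
  -- isinstance guards are vacuous under the List String type
  if string_list.length = 0 then []
  else (createDictLoopA (PySem.List.enumerate string_list 0) PySem.Dict.empty).items

-- ===== PORT B =====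
-- the 'for a, b in zip(s, s[1:]): if a == b' adjacent-duplicate scan over the sorted copy
def adjDupScan : List String → Bool
  | a :: b :: rest => if a = b then true else adjDupScan (b :: rest)
  | _ => false

def create_dict_from_list_alt (string_list : List String) : List (String × Int) :=
  if string_list.length = 0 then []
  else
    let s := PySem.List.sorted string_list (fun x => x) false
    if adjDupScan s then []  -- raise RuntimeError("Received duplicate date ...") — outside Pre_
    else
      -- dict(zip(string_list, range(len(string_list))))
      ((string_list.zip (PySem.List.pyRange 0 string_list.length 1)).foldl
        (fun d p => d.insert p.1 p.2) PySem.Dict.empty).items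

-- ===== PRECONDITION & SPEC =====
-- Pre_ excludes lists with duplicate entries: there both A and B raise RuntimeError.
def Pre_create_dict_from_list (string_list : List String) : Prop := string_list.Nodup
instance (string_list : List String) : Decidable (Pre_create_dict_from_list string_list) := by unfold Pre_create_dict_from_list; infer_instance

def pvWitness_create_dict_from_list : List String := ["2020-01-01", "2020-01-02", ""]

def Spec_create_dict_from_list (string_list : List String) (out : List (String × Int)) : Prop := out = create_dict_from_list_alt string_list
instance (string_list : List String) (out : List (String × Int)) : Decidable (Spec_create_dict_from_list string_list out) := by unfold Spec_create_dict_from_list; infer_instance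

-- ===== CLAIM (what is proved, stated in full; the proofs are below) =====
def Claim_equal_create_dict_from_list : Prop := ∀ (string_list : List String), Dom_create_dict_from_list string_list → Pre_create_dict_from_list string_list → Spec_create_dict_from_list string_list (create_dict_from_list string_list)

-- ===== LEMMAS AND PROOFS =====

-- a duplicate-free list has no equal adjacent pair
lemma adjDupScan_eq_false_of_nodup (l : List String) (h : l.Nodup) : adjDupScan l = false := by
  induction l with
  | nil => rfl
  | cons a t ih =>
    cases t with
    | nil => rfl
    | cons b r =>
      have hab : a ≠ b := by
        intro e; exact (List.nodup_cons.mp h).1 (e ▸ List.mem_cons_self ..)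
      simp only [adjDupScan, hab, if_false]
      exact ih h.of_cons

-- A's guarded loop over fresh distinct keys never takes its raise branch: it is the fold
lemma createDictLoopA_eq_foldl (l : List String) (s : Int) (d : PySem.Dict String Int)
    (hnd : l.Nodup) (hfresh : ∀ x ∈ l, d.contains x = false) :
    createDictLoopA (PySem.List.enumerate l s) d
      = (PySem.List.enumerate l s).foldl (fun d p => d.insert p.2 p.1) d := by
  induction l generalizing s d with
  | nil => simp [PySem.List.enumerate_nil, createDictLoopA]
  | cons x xs ih =>
    rw [PySem.List.enumerate_cons]
    simp only [createDictLoopA, List.foldl_cons, hfresh x (List.mem_cons_self ..)]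
    exact ih (s + 1) _ hnd.of_cons (by
      intro y hy
      rw [PySem.Dict.contains_insert]
      have hyx : y ≠ x := by
        rintro rfl; exact (List.nodup_cons.mp hnd).1 hy
      simp [hyx, hfresh y (List.mem_cons_of_mem _ hy)])

-- the index/value swap: zip l (range s (s+len)) is enumerate l s with pairs flipped
lemma zip_pyRange_eq_map_swap (l : List String) (s : Int) :
    l.zip (PySem.List.pyRange s (s + l.length) 1)
      = (PySem.List.enumerate l s).map (fun p => (p.2, p.1)) := by
  induction l generalizing s with
  | nil => simp [PySem.List.enumerate_nil]
  | cons x xs ih =>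
    rw [PySem.List.enumerate_cons,
      PySem.List.pyRange_one_cons (by simp only [List.length_cons]; omega)]
    simp only [List.zip_cons_cons, List.map_cons]
    have : s + ((x :: xs).length : Int) = (s + 1) + xs.length := by
      simp only [List.length_cons]; push_cast; ring
    rw [this]
    exact congrArg _ (ih (s + 1))

-- ===== VERDICT (by name: the statement is the Claim_ definition above) =====
theorem create_dict_from_list_spec : Claim_equal_create_dict_from_list := by
  intro l _ hpre
  unfold Spec_create_dict_from_list create_dict_from_list create_dict_from_list_alt
  by_cases h : l.length = 0
  · simp [h]
  · simp only [h, if_false]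
    rw [adjDupScan_eq_false_of_nodup _
      ((PySem.List.sorted_perm l (fun x => x) false).nodup_iff.mpr hpre)]
    simp only [Bool.false_eq_true, if_false]
    rw [createDictLoopA_eq_foldl l 0 PySem.Dict.empty hpre
      (fun x _ => PySem.Dict.contains_empty x)]
    have hz : l.zip (PySem.List.pyRange 0 l.length 1)
        = (PySem.List.enumerate l 0).map (fun p => (p.2, p.1)) := by
      have := zip_pyRange_eq_map_swap l 0
      simpa using this
    rw [hz, List.foldl_map]
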